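-- pv_equiv track=rewrite | github.com/mishrakanha1201-debug/MutualFundChatbot | backend/rag/response_formatter.py | _limit_sentences
-- ===== SOURCE A (Python) =====
-- def _limit_sentences(text: str, max_sentences: int) -> str:
--     """Limit text to maximum number of sentences"""
--     # Split by sentence endings, but preserve the punctuation
--     # Use a more sophisticated approach
--     sentences = []
--     current_sentence = ""
--
--     for char in text:
--         current_sentence += char
--         if char in '.!?':
--             sentences.append(current_sentence.strip())
--             current_sentence = ""
--
--     # Add remaining text if any
--     if current_sentence.strip():
--         sentences.append(current_sentence.strip())
--
--     # Filter empty sentences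
--     sentences = [s for s in sentences if s.strip()]
--
--     if len(sentences) <= max_sentences:
--         return text
--
--     # Take first max_sentences and join
--     limited = sentences[:max_sentences]
--     result = ' '.join(limited)
--
--     # Ensure it ends with punctuation
--     if result and not result[-1] in '.!?':
--         result += '.'
--
--     return result
-- ===== SOURCE B (Python) =====
-- def _limit_sentences(text: str, max_sentences: int) -> str:
--     """Limit text to maximum number of sentences"""
--     sentences = _chop(text)
--     if len(sentences) <= max_sentences:
--         return text
--     result = ' '.join(sentences[:max_sentences])
--     return result if (not result or result[-1] in '.!?') else result + '.'
--
--
-- def _chop(text):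
--     # Scan forward to the next terminator, slice that sentence out, continue
--     # after it; a sliced sentence always contains its terminator, so it is
--     # never empty after strip -- only the trailing fragment needs a check.
--     sentences = []
--     pos = 0
--     n = len(text)
--     while True:
--         nxt = pos
--         while nxt < n and text[nxt] not in '.!?':
--             nxt += 1
--         if nxt == n:
--             tail = text[pos:].strip()
--             if tail:
--                 sentences.append(tail)
--             return sentences
--         sentences.append(text[pos:nxt + 1].strip())
--         pos = nxt + 1
-- ===== Notes on version B (the rewrite author's own statement) =====
-- stated objective: alternative
-- what changed: A grows a current_sentence string character by character, flushes it at each terminator and filters empties afterwards; B jumps from terminator to terminator, slicing each sentence out of the text in one step (ported as structural recursion on the remaining suffix) and appends sliced sentences unconditionally since they always contain their terminator, with the join written via intercalate and the punctuation check as a guard-else.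
import Mathlib
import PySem

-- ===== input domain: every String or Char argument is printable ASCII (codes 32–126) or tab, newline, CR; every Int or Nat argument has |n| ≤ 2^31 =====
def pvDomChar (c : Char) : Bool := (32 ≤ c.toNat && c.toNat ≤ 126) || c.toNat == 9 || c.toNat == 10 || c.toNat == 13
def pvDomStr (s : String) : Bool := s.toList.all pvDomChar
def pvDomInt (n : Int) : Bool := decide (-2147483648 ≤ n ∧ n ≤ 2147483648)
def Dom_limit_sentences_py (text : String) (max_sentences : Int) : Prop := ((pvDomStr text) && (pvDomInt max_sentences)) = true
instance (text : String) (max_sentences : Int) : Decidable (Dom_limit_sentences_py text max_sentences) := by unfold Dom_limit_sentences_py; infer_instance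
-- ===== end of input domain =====

-- B replaces A's grow-a-string-and-flush accumulator by a jump-to-next-terminator
-- slicer (structural recursion on the remaining suffix); return values are proved equal.

-- char in '.!?'
def pvTerm (c : Char) : Bool := c == '.' || c == '!' || c == '?'

-- ===== PORT A =====
-- A's loop step: current_sentence grows by one char; on a terminator the stripped sentence is flushed.
def pvStepA (st : List (List Char) × List Char) (c : Char) : List (List Char) × List Char :=
  let cur := st.2 ++ [c]
  if pvTerm c then (st.1 ++ [PySem.Chars.strip cur], []) else (st.1, cur)

-- A's sentence list: the fold over the text, the trailing remainder, then the emptiness filter.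
def pvSentencesA (cs : List Char) : List (List Char) :=
  let st := cs.foldl pvStepA ([], [])
  let s := if PySem.Chars.strip st.2 ≠ [] then st.1 ++ [PySem.Chars.strip st.2] else st.1
  s.filter (fun x => PySem.Chars.strip x ≠ [])

def limit_sentences_py (text : String) (max_sentences : Int) : String :=
  let sentences := pvSentencesA text.toList
  if (sentences.length : Int) ≤ max_sentences then text
  else
    let result := PySem.Chars.join [' '] (PySem.List.slice sentences none (some max_sentences))
    if result ≠ [] ∧ pvTerm (result.getLastD ' ') = false then String.ofList (result ++ ['.'])
    else String.ofList result

-- ===== PORT B =====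
-- B's _chop: scan to the next terminator (takeWhile/dropWhile = the inner while),
-- slice that sentence out, recurse on what follows it; only the tail needs an
-- emptiness check, a sliced sentence keeps its terminator.
def pvChop (cs : List Char) : List (List Char) :=
  match h : cs.dropWhile (fun c => !pvTerm c) with
  | [] =>
      let tail := PySem.Chars.strip cs
      if tail ≠ [] then [tail] else []
  | t :: v =>
      PySem.Chars.strip (cs.takeWhile (fun c => !pvTerm c) ++ [t]) :: pvChop v
termination_by cs.length
decreasing_by
  have hs : (t :: v).length ≤ cs.length := (h ▸ List.dropWhile_suffix _).length_le
  simp only [List.length_cons] at hs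
  omega

def limit_sentences_py_alt (text : String) (max_sentences : Int) : String :=
  let sentences := pvChop text.toList
  if (sentences.length : Int) ≤ max_sentences then text
  else
    let result := List.intercalate [' '] (PySem.List.slice sentences none (some max_sentences))
    if result = [] ∨ pvTerm (result.getLastD ' ') = true then String.ofList result
    else String.ofList (result ++ ['.'])

-- ===== PRECONDITION & SPEC =====
def Spec_limit_sentences_py (text : String) (max_sentences : Int) (out : String) : Prop := out = limit_sentences_py_alt text max_sentences
instance (text : String) (max_sentences : Int) (out : String) : Decidable (Spec_limit_sentences_py text max_sentences out) := by unfold Spec_limit_sentences_py; infer_instance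

-- ===== CLAIM (what is proved, stated in full; the proofs are below) =====
def Claim_equal_limit_sentences_py : Prop := ∀ (text : String) (max_sentences : Int), Dom_limit_sentences_py text max_sentences → Spec_limit_sentences_py text max_sentences (limit_sentences_py text max_sentences)

-- ===== LEMMAS AND PROOFS =====

theorem dropWhile_eq_self_of_head (p : Char → Bool) (l : List Char)
    (h : ∀ hn : l ≠ [], p (l.head hn) = false) : l.dropWhile p = l := by
  cases l with
  | nil => rfl
  | cons c t =>
      have hc := h (by simp)
      simp only [List.head_cons] at hc
      rw [List.dropWhile_cons_of_neg (by simp [hc])]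

theorem dropWhile_cons_head {p : Char → Bool} {l t : List Char} {c : Char}
    (h : l.dropWhile p = c :: t) : p c = false := by
  induction l with
  | nil => simp at h
  | cons a l ih =>
      by_cases pa : p a = true
      · rw [List.dropWhile_cons_of_pos pa] at h; exact ih h
      · rw [List.dropWhile_cons_of_neg pa] at h
        injection h with h1 h2
        subst h1; simpa using pa

theorem strip_append_last (u : List Char) (t : Char) (h : PySem.Chars.isspace t = false) :
    PySem.Chars.strip (u ++ [t]) = PySem.Chars.lstrip u ++ [t] := by
  have h1 : PySem.Chars.lstrip (u ++ [t]) = PySem.Chars.lstrip u ++ [t] := by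
    simp only [PySem.Chars.lstrip, List.dropWhile_append]
    split_ifs with he
    · simp only [List.isEmpty_iff] at he
      rw [he, List.nil_append, List.dropWhile_cons_of_neg (by simp [h])]
    · rfl
  simp only [PySem.Chars.strip, h1, PySem.Chars.rstrip, List.reverse_append, List.reverse_cons,
    List.reverse_nil, List.nil_append]
  rw [List.singleton_append, List.dropWhile_cons_of_neg (by simp [h])]
  simp

theorem strip_strip (s : List Char) : PySem.Chars.strip (PySem.Chars.strip s) = PySem.Chars.strip s := by
  simp only [PySem.Chars.strip, PySem.Chars.rstrip, PySem.Chars.lstrip]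
  cases hzc : List.dropWhile PySem.Chars.isspace (List.dropWhile PySem.Chars.isspace s).reverse with
  | nil => simp
  | cons c z' =>
      have hcz : PySem.Chars.isspace c = false := dropWhile_cons_head hzc
      have hhead : ∀ hn : (c :: z').reverse ≠ [],
          PySem.Chars.isspace ((c :: z').reverse.head hn) = false := by
        intro hn
        have hpre : (c :: z').reverse <+: List.dropWhile PySem.Chars.isspace s := by
          rw [← List.reverse_reverse (List.dropWhile PySem.Chars.isspace s)]
          exact List.reverse_prefix.mpr (hzc ▸ List.dropWhile_suffix PySem.Chars.isspace)
        have hane : List.dropWhile PySem.Chars.isspace s ≠ [] := by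
          intro h0; rw [h0] at hpre; exact hn (List.prefix_nil.mp hpre)
        rw [List.IsPrefix.head hpre hn]
        exact List.head_dropWhile_not _ _
      rw [dropWhile_eq_self_of_head _ _ hhead, List.reverse_reverse,
        List.dropWhile_cons_of_neg (by simp [hcz])]

theorem pvTerm_not_space {c : Char} (h : pvTerm c = true) : PySem.Chars.isspace c = false := by
  simp only [pvTerm, Bool.or_eq_true, beq_iff_eq] at h
  rcases h with (h | h) | h <;> subst h <;> decide

theorem foldA_free (u : List Char) (hu : ∀ c ∈ u, pvTerm c = false) (s : List (List Char)) (cur : List Char) :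
    u.foldl pvStepA (s, cur) = (s, cur ++ u) := by
  induction u generalizing cur with
  | nil => simp
  | cons c u ih =>
      have hc := hu c (by simp)
      have hu' : ∀ x ∈ u, pvTerm x = false := fun x hx => hu x (by simp [hx])
      simp [List.foldl_cons, pvStepA, hc, ih hu']

theorem foldA_acc (v : List Char) (s : List (List Char)) (cur : List Char) :
    v.foldl pvStepA (s, cur) = (s ++ (v.foldl pvStepA ([], cur)).1, (v.foldl pvStepA ([], cur)).2) := by
  induction v generalizing s cur with
  | nil => simp
  | cons c v ih =>
      simp only [List.foldl_cons, pvStepA, List.nil_append]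
      by_cases hc : pvTerm c = true
      · simp only [hc, if_pos]
        rw [ih (s ++ [PySem.Chars.strip (cur ++ [c])]) [], ih [PySem.Chars.strip (cur ++ [c])] []]
        simp
      · have hc' : pvTerm c = false := eq_false_of_ne_true hc
        simp only [hc', Bool.false_eq_true, if_false]
        rw [ih s (cur ++ [c])]

theorem sentencesA_free (cs : List Char) (hu : ∀ c ∈ cs, pvTerm c = false) :
    pvSentencesA cs = if PySem.Chars.strip cs ≠ [] then [PySem.Chars.strip cs] else [] := by
  unfold pvSentencesA
  rw [foldA_free cs hu [] []]
  simp only [List.nil_append]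
  split_ifs with h
  · simp [strip_strip, h]
  · simp

theorem sentencesA_decomp (u : List Char) (t : Char) (v : List Char)
    (hu : ∀ c ∈ u, pvTerm c = false) (ht : pvTerm t = true) :
    pvSentencesA (u ++ t :: v) = (PySem.Chars.lstrip u ++ [t]) :: pvSentencesA v := by
  have hx : PySem.Chars.strip (u ++ [t]) = PySem.Chars.lstrip u ++ [t] :=
    strip_append_last u t (pvTerm_not_space ht)
  unfold pvSentencesA
  rw [List.foldl_append, foldA_free u hu [] [], List.foldl_cons]
  simp only [List.nil_append]
  have hstep : pvStepA ([], u) t = ([PySem.Chars.strip (u ++ [t])], []) := by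
    simp [pvStepA, ht]
  rw [hstep, foldA_acc v [PySem.Chars.strip (u ++ [t])] []]
  simp only [hx]
  have hxs : PySem.Chars.strip (PySem.Chars.lstrip u ++ [t]) = PySem.Chars.lstrip u ++ [t] := by
    rw [← hx, strip_strip, hx]
  split_ifs with h
  · simp [List.filter_cons, hxs, List.filter_append]
  · simp [hxs]

theorem chop_free (cs : List Char) (hu : ∀ c ∈ cs, pvTerm c = false) :
    pvChop cs = if PySem.Chars.strip cs ≠ [] then [PySem.Chars.strip cs] else [] := by
  have hd : cs.dropWhile (fun c => !pvTerm c) = [] := by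
    rw [List.dropWhile_eq_nil_iff]
    intro x hx
    simp [hu x hx]
  rw [pvChop.eq_def]
  split
  · rfl
  · next t v h => rw [hd] at h; cases h

theorem chop_decomp (u : List Char) (t : Char) (v : List Char)
    (hu : ∀ c ∈ u, pvTerm c = false) (ht : pvTerm t = true) :
    pvChop (u ++ t :: v) = (PySem.Chars.lstrip u ++ [t]) :: pvChop v := by
  have hdu : u.dropWhile (fun c => !pvTerm c) = [] := by
    rw [List.dropWhile_eq_nil_iff]
    intro x hx
    simp [hu x hx]
  have hd : (u ++ t :: v).dropWhile (fun c => !pvTerm c) = t :: v := by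
    rw [List.dropWhile_append, hdu]
    simp only [List.isEmpty_nil, if_pos]
    rw [List.dropWhile_cons_of_neg (by simp [ht])]
  have htw : (u ++ t :: v).takeWhile (fun c => !pvTerm c) = u := by
    have := List.takeWhile_append_dropWhile (p := fun c => !pvTerm c) (l := u ++ t :: v)
    rw [hd] at this
    exact List.append_cancel_right (by rw [this])
  rw [pvChop.eq_def]
  split
  · next h => rw [hd] at h; cases h
  · next t' v' h =>
      rw [hd] at h
      injection h with h1 h2
      subst h1; subst h2
      rw [htw, strip_append_last u t (pvTerm_not_space ht)]

theorem sentences_eq (cs : List Char) : pvSentencesA cs = pvChop cs := by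
  induction hn : cs.length using Nat.strong_induction_on generalizing cs with
  | _ n ih =>
      have hdecomp := (List.takeWhile_append_dropWhile (p := fun c => !pvTerm c) (l := cs)).symm
      have hu : ∀ c ∈ cs.takeWhile (fun c => !pvTerm c), pvTerm c = false := by
        intro c hc
        have := List.mem_takeWhile_imp hc
        simpa using this
      cases hr : List.dropWhile (fun c => !pvTerm c) cs with
      | nil =>
          rw [hr] at hdecomp
          simp only [List.append_nil] at hdecomp
          have hall : ∀ c ∈ cs, pvTerm c = false := by
            intro c hc
            exact hu c (by rwa [← hdecomp])
          rw [sentencesA_free _ hall, chop_free _ hall]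
      | cons t v =>
          have ht : pvTerm t = true := by
            have := dropWhile_cons_head hr
            simpa using this
          rw [hr] at hdecomp
          rw [hdecomp, sentencesA_decomp _ t v hu ht, chop_decomp _ t v hu ht]
          congr 1
          exact ih v.length (by subst hn; rw [hdecomp]; simp; omega) v rfl

theorem join_eq_intercalate (xs : List (List Char)) :
    PySem.Chars.join [' '] xs = List.intercalate [' '] xs := by
  induction xs with
  | nil => rfl
  | cons a t ih => cases t <;> simp_all [PySem.Chars.join, List.intercalate, List.intersperse]

-- ===== VERDICT (by name: the statement is the Claim_ definition above) =====
theorem limit_sentences_py_spec : Claim_equal_limit_sentences_py := by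
  intro text max_sentences _
  unfold Spec_limit_sentences_py
  simp only [limit_sentences_py, limit_sentences_py_alt, sentences_eq, join_eq_intercalate]
  by_cases hlen : ((pvChop text.toList).length : Int) ≤ max_sentences
  · rw [if_pos hlen, if_pos hlen]
  · rw [if_neg hlen, if_neg hlen]
    set r := List.intercalate [' '] (PySem.List.slice (pvChop text.toList) none (some max_sentences)) with hr
    by_cases h2 : r = [] ∨ pvTerm (r.getLastD ' ') = true
    · have h1 : ¬ (r ≠ [] ∧ pvTerm (r.getLastD ' ') = false) := by
        rintro ⟨hne, hf⟩
        rcases h2 with h | h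
        · exact hne h
        · rw [h] at hf; cases hf
      rw [if_neg h1, if_pos h2]
    · have h1 : r ≠ [] ∧ pvTerm (r.getLastD ' ') = false := by
        push_neg at h2
        exact ⟨h2.1, by simpa using h2.2⟩
      rw [if_pos h1, if_neg h2]
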